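-- pv_equiv track=rewrite | github.com/dioptra-io/icmp-rate-limiting-classifier | Validation/evaluation.py | compare_routers_set
-- ===== SOURCE A (Python) =====
-- def find_corresponding_router(ip, ground_truth_routers):
--     matches = []
--     for router_name, router in ground_truth_routers.items():
--         for ip_router in router:
--             if ip_router == ip:
--                 matches.append((router_name, router))
--     return matches
--
-- def compare_routers_set(routers_set1, routers_set2):
--     # Now compare the common pairs.
--     common_pairs = set()
--     uncommon_pairs = set()
--     disagreement_pairs = set()
--
--     n_router = 0
--     for router_name, router in routers_set1.items():
--         n_router += 1
--         for i in range(0, len(router)):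
--             # Find the corresponding router in midar
--             corresponding_router_i = find_corresponding_router(router[i], routers_set2)
--             for j in range(i + 1, len(router)):
--                 corresponding_router_j = find_corresponding_router(
--                     router[j], routers_set2
--                 )
--                 if (
--                     corresponding_router_i is not None
--                     and corresponding_router_j is not None
--                 ):
--                     if corresponding_router_i == corresponding_router_j:
--                         common_pairs.add(tuple({router[i], router[j]}))
--                     else:
--                         disagreement_pairs.add(tuple({router[i], router[j]}))
--                 else:
--                     uncommon_pairs.add(tuple({router[i], router[j]}))
--
--     return common_pairs, uncommon_pairs, disagreement_pairs
-- ===== SOURCE B (Python) =====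
-- def compare_routers_set(routers_set1, routers_set2):
--     # Precompute, once per distinct IP, its "signature": the ordered list of
--     # (router_name, router) entries of routers_set2 containing it (with multiplicity).
--     items2 = list(routers_set2.items())
--     sigs = {}
--     for router in routers_set1.values():
--         for ip in router:
--             if ip not in sigs:
--                 sigs[ip] = [(name, r) for name, r in items2 for y in r if y == ip]
--
--     common_pairs = set()
--     disagreement_pairs = set()
--     for router in routers_set1.values():
--         for i in range(len(router)):
--             sig_i = sigs[router[i]]
--             for j in range(i + 1, len(router)):
--                 pair = tuple({router[i], router[j]})
--                 if sig_i == sigs[router[j]]: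
--                     common_pairs.add(pair)
--                 else:
--                     disagreement_pairs.add(pair)
--     # uncommon_pairs is always empty: find_corresponding_router never returns None
--     return common_pairs, set(), disagreement_pairs
-- ===== Notes on version B (the rewrite author's own statement) =====
-- stated objective: faster
-- what changed: B precomputes each distinct IP's routers_set2 signature once in a dict (one pass over routers_set2 per distinct IP) and the pair loop then only compares two dict lookups, instead of A's re-scan of all of routers_set2 for every (i,j) pair; the always-empty uncommon_pairs dead branch is dropped.
import Mathlib
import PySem

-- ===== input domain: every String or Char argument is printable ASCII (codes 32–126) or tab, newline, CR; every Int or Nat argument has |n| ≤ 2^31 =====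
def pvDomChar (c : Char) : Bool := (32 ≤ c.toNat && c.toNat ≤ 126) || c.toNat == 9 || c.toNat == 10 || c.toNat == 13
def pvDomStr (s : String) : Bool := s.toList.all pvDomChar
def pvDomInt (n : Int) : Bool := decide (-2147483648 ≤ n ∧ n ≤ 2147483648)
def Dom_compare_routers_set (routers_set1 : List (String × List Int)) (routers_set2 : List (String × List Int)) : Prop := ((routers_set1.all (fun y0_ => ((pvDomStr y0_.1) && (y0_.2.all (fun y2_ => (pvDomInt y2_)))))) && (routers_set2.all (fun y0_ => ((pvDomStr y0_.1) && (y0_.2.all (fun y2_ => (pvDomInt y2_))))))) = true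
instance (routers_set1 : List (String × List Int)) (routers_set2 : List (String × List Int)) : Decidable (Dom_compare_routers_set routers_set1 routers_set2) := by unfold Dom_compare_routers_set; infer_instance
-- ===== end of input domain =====

-- B precomputes each distinct IP's routers_set2 signature once in a dict, so the
-- (i,j) pair loop compares two lookups instead of re-scanning routers_set2 per pair.

-- ===== shared helper: tuple({a, b}) on two ints =====
-- Hand-ported CPython semantics (both Pythons execute this very expression):
-- a fresh two-int set has an 8-slot table; slot(x) = hash(x) mod 8 with hash(-1) = -2;
-- on a slot collision CPython 3.11 probes i := (i*5 + 1 + (perturb >>= 5)) mod 8 with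
-- perturb starting at the unsigned 64-bit hash; iteration is by ascending table index.
-- Exact for |a|, |b| ≤ 2^31 (checked against CPython 3.11 exhaustively near 0 and at random).
def pyHash (x : Int) : Int := if x = -1 then -2 else x

-- collision probe: the only occupied slot is sa; fuel 20 > 64/5 suffices (u reaches 0,
-- and (5*sa+1) mod 8 = sa is impossible), so the fuel never runs out on our inputs
def probeLoop (sa : Nat) (u : Nat) : Nat → Nat
  | 0 => 0
  | fuel+1 =>
    let u' := u / 32
    let i := (sa * 5 + 1 + u') % 8
    if i = sa then probeLoop sa u' fuel else i

def pyPairTuple (a b : Int) : List Int :=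
  if a = b then [a]
  else
    let sa := ((pyHash a) % 8).toNat
    let sb0 := ((pyHash b) % 8).toNat
    let sb := if sb0 = sa then probeLoop sa ((pyHash b % 18446744073709551616).toNat) 20 else sb0
    if sa < sb then [a, b] else [b, a]

-- ===== PORT A =====
def find_corresponding_router (ip : Int) (ground_truth_routers : List (String × List Int)) : List (String × List Int) :=
  ground_truth_routers.foldl (fun ms nr =>
    nr.2.foldl (fun ms ip_router =>
      if ip_router = ip then ms ++ [nr] else ms) ms) []

def compare_routers_set (routers_set1 : List (String × List Int)) (routers_set2 : List (String × List Int)) : List (List Int) × List (List Int) × List (List Int) :=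
  -- (n_router is dead state in A and is omitted)
  routers_set1.foldl (fun (st : PySem.Set (List Int) × PySem.Set (List Int) × PySem.Set (List Int)) nr =>
    let router := nr.2
    (PySem.List.pyRange 0 (router.length : Int) 1).foldl (fun st i =>
      let corresponding_router_i := find_corresponding_router (PySem.List.pyGetD router i 0) routers_set2
      (PySem.List.pyRange (i + 1) (router.length : Int) 1).foldl (fun st j =>
        let corresponding_router_j := find_corresponding_router (PySem.List.pyGetD router j 0) routers_set2
        -- 'corresponding_router_i is not None and corresponding_router_j is not None':
        -- both are lists (never None), so the Python condition is always True and the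
        -- uncommon branch is dead; the uncommon set st.2.1 is still threaded unchanged
        if corresponding_router_i = corresponding_router_j then
          (PySem.Set.add st.1 (pyPairTuple (PySem.List.pyGetD router i 0) (PySem.List.pyGetD router j 0)), st.2.1, st.2.2)
        else
          (st.1, st.2.1, PySem.Set.add st.2.2 (pyPairTuple (PySem.List.pyGetD router i 0) (PySem.List.pyGetD router j 0)))) st) st)
    (([] : PySem.Set (List Int)), ([] : PySem.Set (List Int)), ([] : PySem.Set (List Int)))

-- ===== PORT B =====
-- [(name, r) for name, r in items2 for y in r if y == ip]
def sigOf (items2 : List (String × List Int)) (ip : Int) : List (String × List Int) :=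
  items2.flatMap (fun nr => (nr.2.filter (fun y => y = ip)).map (fun _ => nr))

def buildSigs (routers_set1 : List (String × List Int)) (routers_set2 : List (String × List Int)) : PySem.Dict Int (List (String × List Int)) :=
  routers_set1.foldl (fun d nr =>
    nr.2.foldl (fun d ip =>
      if d.contains ip then d else d.insert ip (sigOf routers_set2 ip)) d) PySem.Dict.empty

def compare_routers_set_alt (routers_set1 : List (String × List Int)) (routers_set2 : List (String × List Int)) : List (List Int) × List (List Int) × List (List Int) :=
  let sigs := buildSigs routers_set1 routers_set2
  let st := routers_set1.foldl (fun (st : PySem.Set (List Int) × PySem.Set (List Int)) nr =>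
    let router := nr.2
    (PySem.List.pyRange 0 (router.length : Int) 1).foldl (fun st i =>
      -- sigs[router[i]]: KeyError impossible, every IP of routers_set1 was inserted
      let sig_i := (sigs.get? (PySem.List.pyGetD router i 0)).getD []
      (PySem.List.pyRange (i + 1) (router.length : Int) 1).foldl (fun st j =>
        let pair := pyPairTuple (PySem.List.pyGetD router i 0) (PySem.List.pyGetD router j 0)
        if sig_i = (sigs.get? (PySem.List.pyGetD router j 0)).getD [] then
          (PySem.Set.add st.1 pair, st.2)
        else
          (st.1, PySem.Set.add st.2 pair)) st) st)
    (([] : PySem.Set (List Int)), ([] : PySem.Set (List Int)))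
  (st.1, ([] : List (List Int)), st.2)

-- ===== PRECONDITION & SPEC =====
def Spec_compare_routers_set (routers_set1 : List (String × List Int)) (routers_set2 : List (String × List Int)) (out : List (List Int) × List (List Int) × List (List Int)) : Prop := out = compare_routers_set_alt routers_set1 routers_set2
instance (routers_set1 : List (String × List Int)) (routers_set2 : List (String × List Int)) (out : List (List Int) × List (List Int) × List (List Int)) : Decidable (Spec_compare_routers_set routers_set1 routers_set2 out) := by unfold Spec_compare_routers_set; infer_instance

-- ===== CLAIM (what is proved, stated in full; the proofs are below) =====
def Claim_equal_compare_routers_set : Prop := ∀ (routers_set1 : List (String × List Int)) (routers_set2 : List (String × List Int)), Dom_compare_routers_set routers_set1 routers_set2 → Spec_compare_routers_set routers_set1 routers_set2 (compare_routers_set routers_set1 routers_set2)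

-- ===== LEMMAS AND PROOFS =====

-- a fold whose A-side state carries an extra middle component that never changes
-- (A's dead uncommon_pairs set) is the B-side fold with that component re-attached
theorem foldl_drop_mid {α S : Type} (f : S × S × S → α → S × S × S) (g : S × S → α → S × S)
    (u : S) (l : List α)
    (h : ∀ (c dg : S) (x : α), x ∈ l → f (c, u, dg) x = ((g (c, dg) x).1, u, (g (c, dg) x).2)) :
    ∀ (c dg : S), l.foldl f (c, u, dg) = ((l.foldl g (c, dg)).1, u, (l.foldl g (c, dg)).2) := by
  induction l with
  | nil => intro c dg; rfl
  | cons x xs ih =>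
    intro c dg
    simp only [List.foldl_cons]
    rw [h c dg x (List.mem_cons_self)]
    exact ih (fun c dg y hy => h c dg y (List.mem_cons_of_mem _ hy)) _ _

theorem sigOf_eq_fcr (ip : Int) (rs : List (String × List Int)) :
    find_corresponding_router ip rs = sigOf rs ip := by
  unfold find_corresponding_router sigOf
  have inner : (fun (ms : List (String × List Int)) (nr : String × List Int) =>
      nr.2.foldl (fun ms x => if x = ip then ms ++ [nr] else ms) ms)
      = fun ms nr => ms ++ ((nr.2.filter (fun y => y = ip)).map (fun _ => nr)) := by
    funext ms nr
    have := PySem.List.foldl_append_if (fun x => decide (x = ip)) (fun _ => nr) nr.2 ms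
    simpa using this
  rw [inner, PySem.List.foldl_append_eq_flatMap]
  simp

-- the memoisation step of buildSigs
def sigStep (rs2 : List (String × List Int)) (d : PySem.Dict Int (List (String × List Int))) (ip : Int) :
    PySem.Dict Int (List (String × List Int)) :=
  if d.contains ip then d else d.insert ip (sigOf rs2 ip)

theorem sigStep_fold (rs2 : List (String × List Int)) (l : List Int) :
    ∀ (d : PySem.Dict Int (List (String × List Int))),
      (∀ k v, d.get? k = some v → v = sigOf rs2 k) →
      ((∀ k v, (l.foldl (sigStep rs2) d).get? k = some v → v = sigOf rs2 k)
       ∧ (∀ ip, d.contains ip = true → (l.foldl (sigStep rs2) d).contains ip = true)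
       ∧ (∀ ip ∈ l, (l.foldl (sigStep rs2) d).contains ip = true)) := by
  induction l with
  | nil => intro d hd; exact ⟨hd, fun _ h => h, by simp⟩
  | cons x xs ih =>
    intro d hd
    have hgood : ∀ k v, (sigStep rs2 d x).get? k = some v → v = sigOf rs2 k := by
      intro k v h
      unfold sigStep at h
      by_cases hc : d.contains x = true
      · rw [if_pos hc] at h; exact hd _ _ h
      · rw [if_neg hc, PySem.Dict.get?_insert] at h
        by_cases hk : k = x
        · rw [if_pos hk] at h; cases h; exact hk ▸ rfl
        · rw [if_neg hk] at h; exact hd _ _ h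
    have hmono : ∀ ip, d.contains ip = true → (sigStep rs2 d x).contains ip = true := by
      intro ip h
      unfold sigStep
      split
      · exact h
      · rw [PySem.Dict.contains_insert]; simp [h]
    have hx : (sigStep rs2 d x).contains x = true := by
      unfold sigStep
      split
      · assumption
      · rw [PySem.Dict.contains_insert]; simp
    obtain ⟨g, m, c⟩ := ih (sigStep rs2 d x) hgood
    refine ⟨g, fun ip h => m ip (hmono ip h), ?_⟩
    intro ip hip
    rcases List.mem_cons.mp hip with rfl | hmem
    · simp only [List.foldl_cons]; exact m ip hx
    · simp only [List.foldl_cons]; exact c ip hmem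

theorem buildSigs_fold (rs2 : List (String × List Int)) (rs1 : List (String × List Int)) :
    ∀ (d : PySem.Dict Int (List (String × List Int))),
      (∀ k v, d.get? k = some v → v = sigOf rs2 k) →
      ((∀ k v, (rs1.foldl (fun d nr => nr.2.foldl (sigStep rs2) d) d).get? k = some v → v = sigOf rs2 k)
       ∧ (∀ ip, d.contains ip = true → (rs1.foldl (fun d nr => nr.2.foldl (sigStep rs2) d) d).contains ip = true)
       ∧ (∀ nr ∈ rs1, ∀ ip ∈ nr.2, (rs1.foldl (fun d nr => nr.2.foldl (sigStep rs2) d) d).contains ip = true)) := by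
  induction rs1 with
  | nil => intro d hd; exact ⟨hd, fun _ h => h, by simp⟩
  | cons nr rest ih =>
    intro d hd
    obtain ⟨g1, m1, c1⟩ := sigStep_fold rs2 nr.2 d hd
    obtain ⟨g2, m2, c2⟩ := ih (nr.2.foldl (sigStep rs2) d) g1
    refine ⟨g2, fun ip h => m2 ip (m1 ip h), ?_⟩
    intro nr' hnr' ip hip
    rcases List.mem_cons.mp hnr' with rfl | hmem
    · simp only [List.foldl_cons]; exact m2 ip (c1 ip hip)
    · simp only [List.foldl_cons]; exact c2 nr' hmem ip hip

theorem lookup_buildSigs (rs1 rs2 : List (String × List Int)) (nr : String × List Int)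
    (hnr : nr ∈ rs1) (ip : Int) (hip : ip ∈ nr.2) :
    ((buildSigs rs1 rs2).get? ip).getD [] = find_corresponding_router ip rs2 := by
  have hb : buildSigs rs1 rs2 = rs1.foldl (fun d nr => nr.2.foldl (sigStep rs2) d) PySem.Dict.empty := rfl
  obtain ⟨good, _, cov⟩ := buildSigs_fold rs2 rs1 PySem.Dict.empty (by intro k v h; simp [PySem.Dict.get?, PySem.Dict.empty] at h)
  have hc : (buildSigs rs1 rs2).contains ip = true := by rw [hb]; exact cov nr hnr ip hip
  rw [PySem.Dict.contains_eq_isSome_get?] at hc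
  cases hg : (buildSigs rs1 rs2).get? ip with
  | none => rw [hg] at hc; simp at hc
  | some v =>
    rw [hb] at hg
    have := good ip v hg
    rw [sigOf_eq_fcr]
    simp [this]


-- ===== VERDICT (by name: the statement is the Claim_ definition above) =====
theorem compare_routers_set_spec : Claim_equal_compare_routers_set := by
  intro rs1 rs2 _
  unfold Spec_compare_routers_set compare_routers_set compare_routers_set_alt
  show _ = ((rs1.foldl _ (([] : PySem.Set (List Int)), ([] : PySem.Set (List Int)))).1, ([] : List (List Int)), _)
  refine foldl_drop_mid _ _ [] rs1 ?_ [] []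
  intro c dg nr hnr
  dsimp only
  refine foldl_drop_mid _ _ [] _ ?_ c dg
  intro c dg i hi
  dsimp only
  have hi' := PySem.List.mem_pyRange_one.mp hi
  have hIRi : PySem.Raise.InRange nr.2.length i := by
    simp only [PySem.Raise.InRange]; omega
  have hLi : ((buildSigs rs1 rs2).get? (PySem.List.pyGetD nr.2 i 0)).getD []
      = find_corresponding_router (PySem.List.pyGetD nr.2 i 0) rs2 :=
    lookup_buildSigs rs1 rs2 nr hnr _ (PySem.List.pyGetD_mem nr.2 0 hIRi)
  rw [hLi]
  refine foldl_drop_mid _ _ [] _ ?_ c dg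
  intro c dg j hj
  dsimp only
  have hj' := PySem.List.mem_pyRange_one.mp hj
  have hIRj : PySem.Raise.InRange nr.2.length j := by
    simp only [PySem.Raise.InRange]; omega
  have hLj : ((buildSigs rs1 rs2).get? (PySem.List.pyGetD nr.2 j 0)).getD []
      = find_corresponding_router (PySem.List.pyGetD nr.2 j 0) rs2 :=
    lookup_buildSigs rs1 rs2 nr hnr _ (PySem.List.pyGetD_mem nr.2 0 hIRj)
  rw [hLj]
  split <;> rfl
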